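-- pv_equiv track=rewrite | github.com/amd-wsung102/FlyDSL | kernels/moe_gemm_2stage_common_gfx1250.py | _pick_fp16_single_launch_shape
-- ===== SOURCE A (Python) =====
-- def _align_up(v: int, a: int) -> int:
--     return ((int(v) + int(a) - 1) // int(a)) * int(a)
--
-- def _pick_fp16_single_launch_shape(route_tile_m: int, route_tile_n: int,
--                                     max_total_warps: int = 0) -> tuple[int, int, int, int]:
--     """Pick launch shape for fp16 stage1 single-kernel path.
--
--     Single-kernel path should follow route tile size (not backend-expanded 128x*)
--     while keeping legal WMMA tile decomposition.
--     """
--     tile_m = _align_up(int(route_tile_m), 16)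
--     tile_n = _align_up(int(route_tile_n), 16)
--     for mw in (4, 2, 1):
--         if tile_m % mw != 0:
--             continue
--         if (tile_m // mw) % 16 != 0:
--             continue
--         for nw in (8, 4, 2, 1):
--             if max_total_warps > 0 and mw * nw > max_total_warps:
--                 continue
--             if tile_n % nw != 0:
--                 continue
--             if (tile_n // nw) % 16 != 0:
--                 continue
--             return tile_m, tile_n, mw, nw
--     raise ValueError(
--         f"Cannot find legal single-kernel fp16 shape for tile_m={route_tile_m}, tile_n={route_tile_n}"
--     )
-- ===== SOURCE B (Python) =====
-- def _pick_fp16_single_launch_shape(route_tile_m: int, route_tile_n: int,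
--                                     max_total_warps: int = 0) -> tuple[int, int, int, int]:
--     # Closed form, no candidate search: tile = 16*k; the largest legal warp split of a
--     # dimension is the largest power of two dividing k (capped at 4 resp. 8), and a
--     # positive warp budget just saturates each factor, m-major.
--     k = -(-int(route_tile_m) // 16)
--     l = -(-int(route_tile_n) // 16)
--     gm = 4 if k % 4 == 0 else 2 if k % 2 == 0 else 1
--     gn = 8 if l % 8 == 0 else 4 if l % 4 == 0 else 2 if l % 2 == 0 else 1
--     if max_total_warps > 0:
--         gm = min(gm, 4 if max_total_warps >= 4 else 2 if max_total_warps >= 2 else 1)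
--         budget = max_total_warps // gm
--         gn = min(gn, 8 if budget >= 8 else 4 if budget >= 4 else 2 if budget >= 2 else 1)
--     return 16 * k, 16 * l, gm, gn
-- ===== Notes on version B (the rewrite author's own statement) =====
-- stated objective: simpler
-- what changed: B replaces A's nested mw-major candidate scan with continue fall-through by a closed-form computation: align via ceiling division, take the largest power-of-two divisor of tile/16 per dimension (3-way/4-way divisibility tests), and saturate each factor against the warp budget (m-major) with a min; no candidate enumeration at all.
import Mathlib
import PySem

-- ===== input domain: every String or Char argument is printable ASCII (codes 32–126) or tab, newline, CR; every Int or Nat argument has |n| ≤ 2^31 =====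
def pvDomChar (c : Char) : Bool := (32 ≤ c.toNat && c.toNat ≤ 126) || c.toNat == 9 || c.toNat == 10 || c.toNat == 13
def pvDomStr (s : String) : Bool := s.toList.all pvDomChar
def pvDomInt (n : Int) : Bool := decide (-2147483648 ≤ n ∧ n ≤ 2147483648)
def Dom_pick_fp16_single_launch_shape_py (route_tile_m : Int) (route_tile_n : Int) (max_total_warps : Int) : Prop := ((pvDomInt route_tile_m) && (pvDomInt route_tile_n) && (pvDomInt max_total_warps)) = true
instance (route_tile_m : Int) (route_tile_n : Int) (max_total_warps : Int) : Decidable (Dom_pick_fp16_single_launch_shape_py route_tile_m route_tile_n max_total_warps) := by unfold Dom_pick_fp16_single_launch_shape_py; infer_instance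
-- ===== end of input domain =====

set_option maxHeartbeats 1600000

-- B replaces A's nested candidate scan (mw-major, with continue fall-through) by a
-- closed-form computation: the largest power-of-two divisor of tile/16 per dimension,
-- saturated against the warp budget; objective: simpler. A's ValueError branch is
-- unreachable (mw=1, nw=1 is always legal), so both ports are total.


-- ===== PORT A =====
-- _align_up(v, a) = ((v + a - 1) // a) * a  (Python floor division)
def pvAlignUp (v a : Int) : Int := (PySem.Int.floordiv (v + a - 1) a) * a

-- the inner 'for nw in (8, 4, 2, 1)' loop: first legal nw returns, fall-through = none
def pvPickA_nloop (tile_m tile_n max_total_warps mw : Int) : List Int → Option (Int × Int × Int × Int)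
  | [] => none
  | nw :: rest =>
    if max_total_warps > 0 ∧ mw * nw > max_total_warps then
      pvPickA_nloop tile_m tile_n max_total_warps mw rest
    else if PySem.Int.mod tile_n nw ≠ 0 then
      pvPickA_nloop tile_m tile_n max_total_warps mw rest
    else if PySem.Int.mod (PySem.Int.floordiv tile_n nw) 16 ≠ 0 then
      pvPickA_nloop tile_m tile_n max_total_warps mw rest
    else
      some (tile_m, tile_n, mw, nw)

-- the outer 'for mw in (4, 2, 1)' loop; fall-through of the inner loop continues here
def pvPickA_mloop (tile_m tile_n max_total_warps : Int) : List Int → Option (Int × Int × Int × Int)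
  | [] => none
  | mw :: rest =>
    if PySem.Int.mod tile_m mw ≠ 0 then
      pvPickA_mloop tile_m tile_n max_total_warps rest
    else if PySem.Int.mod (PySem.Int.floordiv tile_m mw) 16 ≠ 0 then
      pvPickA_mloop tile_m tile_n max_total_warps rest
    else
      match pvPickA_nloop tile_m tile_n max_total_warps mw [8, 4, 2, 1] with
      | some r => some r
      | none => pvPickA_mloop tile_m tile_n max_total_warps rest

def pick_fp16_single_launch_shape_py (route_tile_m : Int) (route_tile_n : Int) (max_total_warps : Int) : Int × Int × Int × Int :=
  let tile_m := pvAlignUp route_tile_m 16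
  let tile_n := pvAlignUp route_tile_n 16
  -- none = Python's 'raise ValueError' fall-through; unreachable (mw=1, nw=1 always legal)
  (pvPickA_mloop tile_m tile_n max_total_warps [4, 2, 1]).getD (0, 0, 0, 0)

-- ===== PORT B =====
def pick_fp16_single_launch_shape_py_alt (route_tile_m : Int) (route_tile_n : Int) (max_total_warps : Int) : Int × Int × Int × Int :=
  let k := -(PySem.Int.floordiv (-route_tile_m) 16)
  let l := -(PySem.Int.floordiv (-route_tile_n) 16)
  let gm : Int := if PySem.Int.mod k 4 = 0 then 4 else if PySem.Int.mod k 2 = 0 then 2 else 1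
  let gn : Int := if PySem.Int.mod l 8 = 0 then 8 else if PySem.Int.mod l 4 = 0 then 4 else if PySem.Int.mod l 2 = 0 then 2 else 1
  if max_total_warps > 0 then
    let gm' := min gm (if max_total_warps ≥ 4 then 4 else if max_total_warps ≥ 2 then 2 else 1)
    let budget := PySem.Int.floordiv max_total_warps gm'
    let gn' := min gn (if budget ≥ 8 then 8 else if budget ≥ 4 then 4 else if budget ≥ 2 then 2 else 1)
    (16 * k, 16 * l, gm', gn')
  else
    (16 * k, 16 * l, gm, gn)

-- ===== PRECONDITION & SPEC =====
def Spec_pick_fp16_single_launch_shape_py (route_tile_m : Int) (route_tile_n : Int) (max_total_warps : Int) (out : Int × Int × Int × Int) : Prop := out = pick_fp16_single_launch_shape_py_alt route_tile_m route_tile_n max_total_warps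
instance (route_tile_m : Int) (route_tile_n : Int) (max_total_warps : Int) (out : Int × Int × Int × Int) : Decidable (Spec_pick_fp16_single_launch_shape_py route_tile_m route_tile_n max_total_warps out) := by unfold Spec_pick_fp16_single_launch_shape_py; infer_instance

-- ===== CLAIM (what is proved, stated in full; the proofs are below) =====
def Claim_equal_pick_fp16_single_launch_shape_py : Prop := ∀ (route_tile_m : Int) (route_tile_n : Int) (max_total_warps : Int), Dom_pick_fp16_single_launch_shape_py route_tile_m route_tile_n max_total_warps → Spec_pick_fp16_single_launch_shape_py route_tile_m route_tile_n max_total_warps (pick_fp16_single_launch_shape_py route_tile_m route_tile_n max_total_warps)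

-- ===== LEMMAS AND PROOFS =====

-- alignment: ((v+15)//16)*16 = 16 * ceil(v/16), ceiling division written -((-v)//16)
lemma pv_align_eq (v : Int) : pvAlignUp v 16 = 16 * (-(PySem.Int.floordiv (-v) 16)) := by
  unfold pvAlignUp
  rw [PySem.Int.floordiv_eq_ediv_of_pos (by norm_num), PySem.Int.floordiv_eq_ediv_of_pos (by norm_num)]
  omega

-- a 'match' over the Option an inner loop returns, turned back into an if
lemma pv_match_ite {α : Type} (c : Prop) [Decidable c] (x : α) (r : Option α) :
    (match (if c then none else some x) with | some v => some v | none => r)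
      = if c then r else some x := by
  split_ifs <;> rfl

-- a 'match' over an inner loop that surely returned a value
lemma pv_match_some {α : Type} (x : α) (r : Option α) :
    (match (some x : Option α) with | some v => some v | none => r) = some x := rfl

-- a 'match' over an inner loop that fell through
lemma pv_match_none {α : Type} (r : Option α) :
    (match (none : Option α) with | some v => some v | none => r) = r := rfl

-- inner loop of A on a 16-multiple tile_n: returns mw's largest budget-feasible
-- power-of-two split of l (8 = no budget cap), or none when even nw = 1 exceeds the budget
lemma pv_inner_eq (tm l w mw : Int) (hmw : mw = 4 ∨ mw = 2 ∨ mw = 1) :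
    pvPickA_nloop tm (16 * l) w mw [8, 4, 2, 1] =
      if 0 < w ∧ w < mw then none
      else some (tm, 16 * l, mw,
        min (if l % 8 = 0 then (8 : Int) else if l % 4 = 0 then 4 else if l % 2 = 0 then 2 else 1)
            (if 0 < w then (if 8 ≤ w / mw then (8 : Int) else if 4 ≤ w / mw then 4 else if 2 ≤ w / mw then 2 else 1) else 8)) := by
  have h8 : ∀ a : Int, PySem.Int.mod a 8 = a % 8 := fun a => PySem.Int.mod_eq_emod_of_pos (by norm_num)
  have h4 : ∀ a : Int, PySem.Int.mod a 4 = a % 4 := fun a => PySem.Int.mod_eq_emod_of_pos (by norm_num)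
  have h2 : ∀ a : Int, PySem.Int.mod a 2 = a % 2 := fun a => PySem.Int.mod_eq_emod_of_pos (by norm_num)
  have h1 : ∀ a : Int, PySem.Int.mod a 1 = a % 1 := fun a => PySem.Int.mod_eq_emod_of_pos (by norm_num)
  have h16 : ∀ a : Int, PySem.Int.mod a 16 = a % 16 := fun a => PySem.Int.mod_eq_emod_of_pos (by norm_num)
  have f8 : ∀ a : Int, PySem.Int.floordiv a 8 = a / 8 := fun a => PySem.Int.floordiv_eq_ediv_of_pos (by norm_num)
  have f4 : ∀ a : Int, PySem.Int.floordiv a 4 = a / 4 := fun a => PySem.Int.floordiv_eq_ediv_of_pos (by norm_num)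
  have f2 : ∀ a : Int, PySem.Int.floordiv a 2 = a / 2 := fun a => PySem.Int.floordiv_eq_ediv_of_pos (by norm_num)
  have f1 : ∀ a : Int, PySem.Int.floordiv a 1 = a / 1 := fun a => PySem.Int.floordiv_eq_ediv_of_pos (by norm_num)
  have e8 : (16 * l) % 8 = 0 := by omega
  have e4 : (16 * l) % 4 = 0 := by omega
  have e2 : (16 * l) % 2 = 0 := by omega
  have e1 : (16 * l) % 1 = 0 := by omega
  have d8 : (16 * l) / 8 = 2 * l := by omega
  have d4 : (16 * l) / 4 = 4 * l := by omega
  have d2 : (16 * l) / 2 = 8 * l := by omega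
  have d1 : (16 * l) / 1 = 16 * l := by omega
  have e16l : (16 * l) % 16 = 0 := by omega
  have r8 : (2 * l) % 16 = 0 ↔ l % 8 = 0 := by omega
  have r4 : (4 * l) % 16 = 0 ↔ l % 4 = 0 := by omega
  have r2 : (8 * l) % 16 = 0 ↔ l % 2 = 0 := by omega
  rcases hmw with rfl | rfl | rfl
  · by_cases hw : 0 < w
    · have c8 : (w < 32) ↔ ¬ (8 ≤ w / 4) := by omega
      have c4 : (w < 16) ↔ ¬ (4 ≤ w / 4) := by omega
      have c2 : (w < 8) ↔ ¬ (2 ≤ w / 4) := by omega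
      have c1 : (w < 4) ↔ ¬ (1 ≤ w / 4) := by omega
      simp only [pvPickA_nloop, h8, h4, h2, h1, h16, f8, f4, f2, f1, e8, e4, e2, e1,
        d8, d4, d2, d1, e16l, r8, r4, r2, gt_iff_lt, hw, true_and, c8, c4, c2, c1,
        ne_eq, ite_not, not_not, not_true_eq_false, ite_false, ite_true, if_false, if_true]
      split_ifs <;>
        first
          | rfl
          | (exfalso; omega)
          | (simp only [Option.some.injEq, Prod.mk.injEq, true_and]; omega)
          | (simp only [Option.some.injEq, Prod.mk.injEq, true_and, Int.min_def]; split_ifs <;> omega)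
    · simp only [pvPickA_nloop, h8, h4, h2, h1, h16, f8, f4, f2, f1, e8, e4, e2, e1,
        d8, d4, d2, d1, e16l, r8, r4, r2, gt_iff_lt, hw, false_and, ite_false, if_false,
        ne_eq, ite_not, not_not, not_true_eq_false, ite_true, if_true]
      split_ifs <;>
        first
          | rfl
          | (exfalso; omega)
          | (simp only [Option.some.injEq, Prod.mk.injEq, true_and]; omega)
          | (simp only [Option.some.injEq, Prod.mk.injEq, true_and, Int.min_def]; split_ifs <;> omega)
  · by_cases hw : 0 < w
    · have c8 : (w < 16) ↔ ¬ (8 ≤ w / 2) := by omega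
      have c4 : (w < 8) ↔ ¬ (4 ≤ w / 2) := by omega
      have c2 : (w < 4) ↔ ¬ (2 ≤ w / 2) := by omega
      have c1 : (w < 2) ↔ ¬ (1 ≤ w / 2) := by omega
      simp only [pvPickA_nloop, h8, h4, h2, h1, h16, f8, f4, f2, f1, e8, e4, e2, e1,
        d8, d4, d2, d1, e16l, r8, r4, r2, gt_iff_lt, hw, true_and, c8, c4, c2, c1,
        ne_eq, ite_not, not_not, not_true_eq_false, ite_false, ite_true, if_false, if_true]
      split_ifs <;>
        first
          | rfl
          | (exfalso; omega)
          | (simp only [Option.some.injEq, Prod.mk.injEq, true_and]; omega)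
          | (simp only [Option.some.injEq, Prod.mk.injEq, true_and, Int.min_def]; split_ifs <;> omega)
    · simp only [pvPickA_nloop, h8, h4, h2, h1, h16, f8, f4, f2, f1, e8, e4, e2, e1,
        d8, d4, d2, d1, e16l, r8, r4, r2, gt_iff_lt, hw, false_and, ite_false, if_false,
        ne_eq, ite_not, not_not, not_true_eq_false, ite_true, if_true]
      split_ifs <;>
        first
          | rfl
          | (exfalso; omega)
          | (simp only [Option.some.injEq, Prod.mk.injEq, true_and]; omega)
          | (simp only [Option.some.injEq, Prod.mk.injEq, true_and, Int.min_def]; split_ifs <;> omega)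
  · by_cases hw : 0 < w
    · have c8 : (w < 8) ↔ ¬ (8 ≤ w / 1) := by omega
      have c4 : (w < 4) ↔ ¬ (4 ≤ w / 1) := by omega
      have c2 : (w < 2) ↔ ¬ (2 ≤ w / 1) := by omega
      have c1 : (w < 1) ↔ ¬ (1 ≤ w / 1) := by omega
      simp only [pvPickA_nloop, h8, h4, h2, h1, h16, f8, f4, f2, f1, e8, e4, e2, e1,
        d8, d4, d2, d1, e16l, r8, r4, r2, gt_iff_lt, hw, true_and, c8, c4, c2, c1,
        ne_eq, ite_not, not_not, not_true_eq_false, ite_false, ite_true, if_false, if_true]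
      split_ifs <;>
        first
          | rfl
          | (exfalso; omega)
          | (simp only [Option.some.injEq, Prod.mk.injEq, true_and]; omega)
          | (simp only [Option.some.injEq, Prod.mk.injEq, true_and, Int.min_def]; split_ifs <;> omega)
    · simp only [pvPickA_nloop, h8, h4, h2, h1, h16, f8, f4, f2, f1, e8, e4, e2, e1,
        d8, d4, d2, d1, e16l, r8, r4, r2, gt_iff_lt, hw, false_and, ite_false, if_false,
        ne_eq, ite_not, not_not, not_true_eq_false, ite_true, if_true]
      split_ifs <;>
        first
          | rfl
          | (exfalso; omega)
          | (simp only [Option.some.injEq, Prod.mk.injEq, true_and]; omega)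
          | (simp only [Option.some.injEq, Prod.mk.injEq, true_and, Int.min_def]; split_ifs <;> omega)

-- outer loop of A, large-budget regime (w ≥ 4): no inner fall-through is possible
lemma pv_outer_big (k l w : Int) (hw : 0 < w) (hw4 : 4 ≤ w) :
    pvPickA_mloop (16 * k) (16 * l) w [4, 2, 1] =
      some (
        if 0 < w then
          (16 * k, 16 * l,
            min (if k % 4 = 0 then (4 : Int) else if k % 2 = 0 then 2 else 1)
                (if 4 ≤ w then (4 : Int) else if 2 ≤ w then 2 else 1),
            min (if l % 8 = 0 then (8 : Int) else if l % 4 = 0 then 4 else if l % 2 = 0 then 2 else 1)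
                (if 8 ≤ w / (min (if k % 4 = 0 then (4 : Int) else if k % 2 = 0 then 2 else 1)
                      (if 4 ≤ w then (4 : Int) else if 2 ≤ w then 2 else 1)) then (8 : Int)
                 else if 4 ≤ w / (min (if k % 4 = 0 then (4 : Int) else if k % 2 = 0 then 2 else 1)
                      (if 4 ≤ w then (4 : Int) else if 2 ≤ w then 2 else 1)) then 4
                 else if 2 ≤ w / (min (if k % 4 = 0 then (4 : Int) else if k % 2 = 0 then 2 else 1)
                      (if 4 ≤ w then (4 : Int) else if 2 ≤ w then 2 else 1)) then 2 else 1))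
        else
          (16 * k, 16 * l,
            (if k % 4 = 0 then (4 : Int) else if k % 2 = 0 then 2 else 1),
            (if l % 8 = 0 then (8 : Int) else if l % 4 = 0 then 4 else if l % 2 = 0 then 2 else 1))) := by
  have h4 : ∀ a : Int, PySem.Int.mod a 4 = a % 4 := fun a => PySem.Int.mod_eq_emod_of_pos (by norm_num)
  have h2 : ∀ a : Int, PySem.Int.mod a 2 = a % 2 := fun a => PySem.Int.mod_eq_emod_of_pos (by norm_num)
  have h1 : ∀ a : Int, PySem.Int.mod a 1 = a % 1 := fun a => PySem.Int.mod_eq_emod_of_pos (by norm_num)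
  have h16 : ∀ a : Int, PySem.Int.mod a 16 = a % 16 := fun a => PySem.Int.mod_eq_emod_of_pos (by norm_num)
  have f4 : ∀ a : Int, PySem.Int.floordiv a 4 = a / 4 := fun a => PySem.Int.floordiv_eq_ediv_of_pos (by norm_num)
  have f2 : ∀ a : Int, PySem.Int.floordiv a 2 = a / 2 := fun a => PySem.Int.floordiv_eq_ediv_of_pos (by norm_num)
  have f1 : ∀ a : Int, PySem.Int.floordiv a 1 = a / 1 := fun a => PySem.Int.floordiv_eq_ediv_of_pos (by norm_num)
  have e4 : (16 * k) % 4 = 0 := by omega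
  have e2 : (16 * k) % 2 = 0 := by omega
  have e1 : (16 * k) % 1 = 0 := by omega
  have d4 : (16 * k) / 4 = 4 * k := by omega
  have d2 : (16 * k) / 2 = 8 * k := by omega
  have d1 : (16 * k) / 1 = 16 * k := by omega
  have e16k : (16 * k) % 16 = 0 := by omega
  have rk4 : (4 * k) % 16 = 0 ↔ k % 4 = 0 := by omega
  have rk2 : (8 * k) % 16 = 0 ↔ k % 2 = 0 := by omega
  have nf4 : ¬ (0 < w ∧ w < 4) := by omega
  have nf2 : ¬ (0 < w ∧ w < 2) := by omega
  have nf1 : ¬ (0 < w ∧ w < 1) := by omega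
  have mgm : min (if k % 4 = 0 then (4 : Int) else if k % 2 = 0 then 2 else 1) (4 : Int)
      = (if k % 4 = 0 then (4 : Int) else if k % 2 = 0 then 2 else 1) := by
    split_ifs <;> norm_num
  have i4 : pvPickA_nloop (16 * k) (16 * l) w 4 [8, 4, 2, 1] =
      some (16 * k, 16 * l, 4, min (if l % 8 = 0 then (8 : Int) else if l % 4 = 0 then 4 else if l % 2 = 0 then 2 else 1)
        (if 8 ≤ w / 4 then (8 : Int) else if 4 ≤ w / 4 then 4 else if 2 ≤ w / 4 then 2 else 1)) := by
    rw [pv_inner_eq (16 * k) l w 4 (by norm_num), if_neg nf4, if_pos hw]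
  have i2 : pvPickA_nloop (16 * k) (16 * l) w 2 [8, 4, 2, 1] =
      some (16 * k, 16 * l, 2, min (if l % 8 = 0 then (8 : Int) else if l % 4 = 0 then 4 else if l % 2 = 0 then 2 else 1)
        (if 8 ≤ w / 2 then (8 : Int) else if 4 ≤ w / 2 then 4 else if 2 ≤ w / 2 then 2 else 1)) := by
    rw [pv_inner_eq (16 * k) l w 2 (by norm_num), if_neg nf2, if_pos hw]
  have i1 : pvPickA_nloop (16 * k) (16 * l) w 1 [8, 4, 2, 1] =
      some (16 * k, 16 * l, 1, min (if l % 8 = 0 then (8 : Int) else if l % 4 = 0 then 4 else if l % 2 = 0 then 2 else 1)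
        (if 8 ≤ w / 1 then (8 : Int) else if 4 ≤ w / 1 then 4 else if 2 ≤ w / 1 then 2 else 1)) := by
    rw [pv_inner_eq (16 * k) l w 1 (by norm_num), if_neg nf1, if_pos hw]
  simp only [pvPickA_mloop, i4, i2, i1, pv_match_some,
    h4, h2, h1, h16, f4, f2, f1, e4, e2, e1, d4, d2, d1, e16k, rk4, rk2,
    hw, hw4, mgm, ne_eq, ite_not, not_not, not_true_eq_false,
    ite_false, ite_true, if_false, if_true, true_and]
  split_ifs <;>
    first
      | rfl
      | (exfalso; omega)
      | (simp only [Option.some.injEq, Prod.mk.injEq, true_and]; omega)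
          | (simp only [Option.some.injEq, Prod.mk.injEq, true_and, Int.min_def]; split_ifs <;> omega)

-- outer loop of A, tiny budget (0 < w < 4): inner loops can fall through to smaller mw
lemma pv_outer_small (k l w : Int) (hw : 0 < w) (hwlt : w < 4) :
    pvPickA_mloop (16 * k) (16 * l) w [4, 2, 1] =
      some (
        if 0 < w then
          (16 * k, 16 * l,
            min (if k % 4 = 0 then (4 : Int) else if k % 2 = 0 then 2 else 1)
                (if 4 ≤ w then (4 : Int) else if 2 ≤ w then 2 else 1),
            min (if l % 8 = 0 then (8 : Int) else if l % 4 = 0 then 4 else if l % 2 = 0 then 2 else 1)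
                (if 8 ≤ w / (min (if k % 4 = 0 then (4 : Int) else if k % 2 = 0 then 2 else 1)
                      (if 4 ≤ w then (4 : Int) else if 2 ≤ w then 2 else 1)) then (8 : Int)
                 else if 4 ≤ w / (min (if k % 4 = 0 then (4 : Int) else if k % 2 = 0 then 2 else 1)
                      (if 4 ≤ w then (4 : Int) else if 2 ≤ w then 2 else 1)) then 4
                 else if 2 ≤ w / (min (if k % 4 = 0 then (4 : Int) else if k % 2 = 0 then 2 else 1)
                      (if 4 ≤ w then (4 : Int) else if 2 ≤ w then 2 else 1)) then 2 else 1))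
        else
          (16 * k, 16 * l,
            (if k % 4 = 0 then (4 : Int) else if k % 2 = 0 then 2 else 1),
            (if l % 8 = 0 then (8 : Int) else if l % 4 = 0 then 4 else if l % 2 = 0 then 2 else 1))) := by
  have h4 : ∀ a : Int, PySem.Int.mod a 4 = a % 4 := fun a => PySem.Int.mod_eq_emod_of_pos (by norm_num)
  have h2 : ∀ a : Int, PySem.Int.mod a 2 = a % 2 := fun a => PySem.Int.mod_eq_emod_of_pos (by norm_num)
  have h1 : ∀ a : Int, PySem.Int.mod a 1 = a % 1 := fun a => PySem.Int.mod_eq_emod_of_pos (by norm_num)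
  have h16 : ∀ a : Int, PySem.Int.mod a 16 = a % 16 := fun a => PySem.Int.mod_eq_emod_of_pos (by norm_num)
  have f4 : ∀ a : Int, PySem.Int.floordiv a 4 = a / 4 := fun a => PySem.Int.floordiv_eq_ediv_of_pos (by norm_num)
  have f2 : ∀ a : Int, PySem.Int.floordiv a 2 = a / 2 := fun a => PySem.Int.floordiv_eq_ediv_of_pos (by norm_num)
  have f1 : ∀ a : Int, PySem.Int.floordiv a 1 = a / 1 := fun a => PySem.Int.floordiv_eq_ediv_of_pos (by norm_num)
  have e4 : (16 * k) % 4 = 0 := by omega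
  have e2 : (16 * k) % 2 = 0 := by omega
  have e1 : (16 * k) % 1 = 0 := by omega
  have d4 : (16 * k) / 4 = 4 * k := by omega
  have d2 : (16 * k) / 2 = 8 * k := by omega
  have d1 : (16 * k) / 1 = 16 * k := by omega
  have e16k : (16 * k) % 16 = 0 := by omega
  have rk4 : (4 * k) % 16 = 0 ↔ k % 4 = 0 := by omega
  have rk2 : (8 * k) % 16 = 0 ↔ k % 2 = 0 := by omega
  have hw3 : w = 1 ∨ w = 2 ∨ w = 3 := by omega
  rcases hw3 with rfl | rfl | rfl
  · have i4 : pvPickA_nloop (16 * k) (16 * l) 1 4 [8, 4, 2, 1] = none := by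
      rw [pv_inner_eq (16 * k) l 1 4 (by norm_num)]; norm_num
    have i2 : pvPickA_nloop (16 * k) (16 * l) 1 2 [8, 4, 2, 1] = none := by
      rw [pv_inner_eq (16 * k) l 1 2 (by norm_num)]; norm_num
    have i1 : pvPickA_nloop (16 * k) (16 * l) 1 1 [8, 4, 2, 1] = some (16 * k, 16 * l, 1, min (if l % 8 = 0 then (8 : Int) else if l % 4 = 0 then 4 else if l % 2 = 0 then 2 else 1) 1) := by
      rw [pv_inner_eq (16 * k) l 1 1 (by norm_num)]; norm_num
    have mg1 : min (if k % 4 = 0 then (4 : Int) else if k % 2 = 0 then 2 else 1) 1 = 1 := by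
      split_ifs <;> norm_num
    simp only [pvPickA_mloop, i4, i2, i1, pv_match_some, pv_match_none, mg1, Int.reduceLE, Int.reduceLT, Int.reduceDiv, Int.reduceMul, Int.reduceNeg,
      h4, h2, h1, h16, f4, f2, f1, e4, e2, e1, d4, d2, d1, e16k, rk4, rk2,
      ne_eq, ite_not, not_not, not_true_eq_false, ite_false, ite_true,
      if_false, if_true, true_and]
    split_ifs <;>
      first
        | rfl
        | (exfalso; omega)
        | (simp only [Option.some.injEq, Prod.mk.injEq, true_and]; omega)
          | (simp only [Option.some.injEq, Prod.mk.injEq, true_and, Int.min_def]; split_ifs <;> omega)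
  · have i4 : pvPickA_nloop (16 * k) (16 * l) 2 4 [8, 4, 2, 1] = none := by
      rw [pv_inner_eq (16 * k) l 2 4 (by norm_num)]; norm_num
    have i2 : pvPickA_nloop (16 * k) (16 * l) 2 2 [8, 4, 2, 1] = some (16 * k, 16 * l, 2, min (if l % 8 = 0 then (8 : Int) else if l % 4 = 0 then 4 else if l % 2 = 0 then 2 else 1) 1) := by
      rw [pv_inner_eq (16 * k) l 2 2 (by norm_num)]; norm_num
    have i1 : pvPickA_nloop (16 * k) (16 * l) 2 1 [8, 4, 2, 1] = some (16 * k, 16 * l, 1, min (if l % 8 = 0 then (8 : Int) else if l % 4 = 0 then 4 else if l % 2 = 0 then 2 else 1) 2) := by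
      rw [pv_inner_eq (16 * k) l 2 1 (by norm_num)]; norm_num
    have mg2 : min (if k % 4 = 0 then (4 : Int) else if k % 2 = 0 then 2 else 1) 2
        = if k % 2 = 0 then (2 : Int) else 1 := by
      split_ifs <;> first | (exfalso; omega) | norm_num
    simp only [pvPickA_mloop, i4, i2, i1, pv_match_some, pv_match_none, mg2, Int.reduceLE, Int.reduceLT, Int.reduceDiv, Int.reduceMul, Int.reduceNeg,
      h4, h2, h1, h16, f4, f2, f1, e4, e2, e1, d4, d2, d1, e16k, rk4, rk2,
      ne_eq, ite_not, not_not, not_true_eq_false, ite_false, ite_true,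
      if_false, if_true, true_and]
    split_ifs <;>
      first
        | rfl
        | (exfalso; omega)
        | (simp only [Option.some.injEq, Prod.mk.injEq, true_and]; omega)
          | (simp only [Option.some.injEq, Prod.mk.injEq, true_and, Int.min_def]; split_ifs <;> omega)
  · have i4 : pvPickA_nloop (16 * k) (16 * l) 3 4 [8, 4, 2, 1] = none := by
      rw [pv_inner_eq (16 * k) l 3 4 (by norm_num)]; norm_num
    have i2 : pvPickA_nloop (16 * k) (16 * l) 3 2 [8, 4, 2, 1] = some (16 * k, 16 * l, 2, min (if l % 8 = 0 then (8 : Int) else if l % 4 = 0 then 4 else if l % 2 = 0 then 2 else 1) 1) := by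
      rw [pv_inner_eq (16 * k) l 3 2 (by norm_num)]; norm_num
    have i1 : pvPickA_nloop (16 * k) (16 * l) 3 1 [8, 4, 2, 1] = some (16 * k, 16 * l, 1, min (if l % 8 = 0 then (8 : Int) else if l % 4 = 0 then 4 else if l % 2 = 0 then 2 else 1) 2) := by
      rw [pv_inner_eq (16 * k) l 3 1 (by norm_num)]; norm_num
    have mg2 : min (if k % 4 = 0 then (4 : Int) else if k % 2 = 0 then 2 else 1) 2
        = if k % 2 = 0 then (2 : Int) else 1 := by
      split_ifs <;> first | (exfalso; omega) | norm_num
    simp only [pvPickA_mloop, i4, i2, i1, pv_match_some, pv_match_none, mg2, Int.reduceLE, Int.reduceLT, Int.reduceDiv, Int.reduceMul, Int.reduceNeg,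
      h4, h2, h1, h16, f4, f2, f1, e4, e2, e1, d4, d2, d1, e16k, rk4, rk2,
      ne_eq, ite_not, not_not, not_true_eq_false, ite_false, ite_true,
      if_false, if_true, true_and]
    split_ifs <;>
      first
        | rfl
        | (exfalso; omega)
        | (simp only [Option.some.injEq, Prod.mk.injEq, true_and]; omega)
          | (simp only [Option.some.injEq, Prod.mk.injEq, true_and, Int.min_def]; split_ifs <;> omega)

-- outer loop of A, disabled budget (w ≤ 0)
lemma pv_outer_nw (k l w : Int) (hw : ¬ 0 < w) :
    pvPickA_mloop (16 * k) (16 * l) w [4, 2, 1] =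
      some (
        if 0 < w then
          (16 * k, 16 * l,
            min (if k % 4 = 0 then (4 : Int) else if k % 2 = 0 then 2 else 1)
                (if 4 ≤ w then (4 : Int) else if 2 ≤ w then 2 else 1),
            min (if l % 8 = 0 then (8 : Int) else if l % 4 = 0 then 4 else if l % 2 = 0 then 2 else 1)
                (if 8 ≤ w / (min (if k % 4 = 0 then (4 : Int) else if k % 2 = 0 then 2 else 1)
                      (if 4 ≤ w then (4 : Int) else if 2 ≤ w then 2 else 1)) then (8 : Int)
                 else if 4 ≤ w / (min (if k % 4 = 0 then (4 : Int) else if k % 2 = 0 then 2 else 1)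
                      (if 4 ≤ w then (4 : Int) else if 2 ≤ w then 2 else 1)) then 4
                 else if 2 ≤ w / (min (if k % 4 = 0 then (4 : Int) else if k % 2 = 0 then 2 else 1)
                      (if 4 ≤ w then (4 : Int) else if 2 ≤ w then 2 else 1)) then 2 else 1))
        else
          (16 * k, 16 * l,
            (if k % 4 = 0 then (4 : Int) else if k % 2 = 0 then 2 else 1),
            (if l % 8 = 0 then (8 : Int) else if l % 4 = 0 then 4 else if l % 2 = 0 then 2 else 1))) := by
  have h4 : ∀ a : Int, PySem.Int.mod a 4 = a % 4 := fun a => PySem.Int.mod_eq_emod_of_pos (by norm_num)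
  have h2 : ∀ a : Int, PySem.Int.mod a 2 = a % 2 := fun a => PySem.Int.mod_eq_emod_of_pos (by norm_num)
  have h1 : ∀ a : Int, PySem.Int.mod a 1 = a % 1 := fun a => PySem.Int.mod_eq_emod_of_pos (by norm_num)
  have h16 : ∀ a : Int, PySem.Int.mod a 16 = a % 16 := fun a => PySem.Int.mod_eq_emod_of_pos (by norm_num)
  have f4 : ∀ a : Int, PySem.Int.floordiv a 4 = a / 4 := fun a => PySem.Int.floordiv_eq_ediv_of_pos (by norm_num)
  have f2 : ∀ a : Int, PySem.Int.floordiv a 2 = a / 2 := fun a => PySem.Int.floordiv_eq_ediv_of_pos (by norm_num)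
  have f1 : ∀ a : Int, PySem.Int.floordiv a 1 = a / 1 := fun a => PySem.Int.floordiv_eq_ediv_of_pos (by norm_num)
  have e4 : (16 * k) % 4 = 0 := by omega
  have e2 : (16 * k) % 2 = 0 := by omega
  have e1 : (16 * k) % 1 = 0 := by omega
  have d4 : (16 * k) / 4 = 4 * k := by omega
  have d2 : (16 * k) / 2 = 8 * k := by omega
  have d1 : (16 * k) / 1 = 16 * k := by omega
  have e16k : (16 * k) % 16 = 0 := by omega
  have rk4 : (4 * k) % 16 = 0 ↔ k % 4 = 0 := by omega
  have rk2 : (8 * k) % 16 = 0 ↔ k % 2 = 0 := by omega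
  have mgn : min (if l % 8 = 0 then (8 : Int) else if l % 4 = 0 then 4 else if l % 2 = 0 then 2 else 1) (8 : Int)
      = (if l % 8 = 0 then (8 : Int) else if l % 4 = 0 then 4 else if l % 2 = 0 then 2 else 1) := by
    split_ifs <;> norm_num
  simp only [pvPickA_mloop, pv_inner_eq (16 * k) l w 4 (by norm_num),
    pv_inner_eq (16 * k) l w 2 (by norm_num), pv_inner_eq (16 * k) l w 1 (by norm_num),
    pv_match_ite, h4, h2, h1, h16, f4, f2, f1, e4, e2, e1, d4, d2, d1, e16k, rk4, rk2,
    hw, mgn, ne_eq, ite_not, not_not, not_true_eq_false, ite_false, ite_true,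
    if_false, if_true, false_and]
  split_ifs <;>
    first
      | rfl
      | (exfalso; omega)
      | (simp only [Option.some.injEq, Prod.mk.injEq, true_and]; omega)
          | (simp only [Option.some.injEq, Prod.mk.injEq, true_and, Int.min_def]; split_ifs <;> omega)

-- outer loop of A on 16-multiple tiles: the closed form B computes (stated with emod/ediv)
lemma pv_outer_eq (k l w : Int) :
    pvPickA_mloop (16 * k) (16 * l) w [4, 2, 1] =
      some (
        if 0 < w then
          (16 * k, 16 * l,
            min (if k % 4 = 0 then (4 : Int) else if k % 2 = 0 then 2 else 1)
                (if 4 ≤ w then (4 : Int) else if 2 ≤ w then 2 else 1),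
            min (if l % 8 = 0 then (8 : Int) else if l % 4 = 0 then 4 else if l % 2 = 0 then 2 else 1)
                (if 8 ≤ w / (min (if k % 4 = 0 then (4 : Int) else if k % 2 = 0 then 2 else 1)
                      (if 4 ≤ w then (4 : Int) else if 2 ≤ w then 2 else 1)) then (8 : Int)
                 else if 4 ≤ w / (min (if k % 4 = 0 then (4 : Int) else if k % 2 = 0 then 2 else 1)
                      (if 4 ≤ w then (4 : Int) else if 2 ≤ w then 2 else 1)) then 4
                 else if 2 ≤ w / (min (if k % 4 = 0 then (4 : Int) else if k % 2 = 0 then 2 else 1)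
                      (if 4 ≤ w then (4 : Int) else if 2 ≤ w then 2 else 1)) then 2 else 1))
        else
          (16 * k, 16 * l,
            (if k % 4 = 0 then (4 : Int) else if k % 2 = 0 then 2 else 1),
            (if l % 8 = 0 then (8 : Int) else if l % 4 = 0 then 4 else if l % 2 = 0 then 2 else 1))) := by
  by_cases hw : 0 < w
  · by_cases hw4 : 4 ≤ w
    · exact pv_outer_big k l w hw hw4
    · exact pv_outer_small k l w hw (by omega)
  · exact pv_outer_nw k l w hw

-- ===== VERDICT (by name: the statement is the Claim_ definition above) =====
theorem pick_fp16_single_launch_shape_py_spec : Claim_equal_pick_fp16_single_launch_shape_py := by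
  intro m n w _
  unfold Spec_pick_fp16_single_launch_shape_py
  unfold pick_fp16_single_launch_shape_py pick_fp16_single_launch_shape_py_alt
  simp only [pv_align_eq]
  set k := -(PySem.Int.floordiv (-m) 16) with hk
  set l := -(PySem.Int.floordiv (-n) 16) with hl
  have h4 : ∀ a : Int, PySem.Int.mod a 4 = a % 4 := fun a => PySem.Int.mod_eq_emod_of_pos (by norm_num)
  have h2 : ∀ a : Int, PySem.Int.mod a 2 = a % 2 := fun a => PySem.Int.mod_eq_emod_of_pos (by norm_num)
  have h8 : ∀ a : Int, PySem.Int.mod a 8 = a % 8 := fun a => PySem.Int.mod_eq_emod_of_pos (by norm_num)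
  have hgmpos : (0 : Int) < min (if k % 4 = 0 then (4 : Int) else if k % 2 = 0 then 2 else 1)
      (if 4 ≤ w then (4 : Int) else if 2 ≤ w then 2 else 1) := by
    apply lt_min <;> split_ifs <;> norm_num
  rw [pv_outer_eq k l w]
  simp only [Option.getD_some, h4, h2, h8, gt_iff_lt, ge_iff_le,
    PySem.Int.floordiv_eq_ediv_of_pos hgmpos]
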